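-- pv_equiv track=rewrite | github.com/MahdiBaghbani/Python-Encryption | source/lib/TextAnalyzer.py | get_word_from_index
-- ===== SOURCE A (Python) =====
-- def letter_index_finder(string: str, character: str) -> list:
--     """
--     Function to return index of every occurrence of a given character in a string
--
--     :param string: input string
--     :param character: character
--     :return: list containing index
--     """
--
--     # check inputs
--     if not (type(string) == str and type(character) == str):
--         raise TypeError("Arguments of this function must be of type string.\n")
--     # return index list
--     return [i for i, ltr in enumerate(string) if ltr == character]
--
-- def get_word_from_index(string: str, index: int) -> str:
--     """
--     This function takes a string and an index, then will return
--     a word in the string that has a letter corresponding to that index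
--     for example string 'Lulu is a cute girl" and index "5", the fifth element
--      in string is "i" this function will return the word containing "i" which is "is"
--
--     :param string: input string
--     :param index: an index of a letter of a word in the input string
--     :return: return a string containing required word
--     """
--
--     # check inputs
--     if not (type(string) == str and type(index) == int):
--         raise TypeError("Arguments of this function have wrong type.\n")
--     # list indexes of all spaces in the string
--     space_index = letter_index_finder(string, ' ')
--     # if the given index is not in space_index then it's not a space and is a letter
--     if index not in space_index:
--         # find right and left spaces of given index
--         right_space_indexes = [i for i in space_index if i > index]
--         left_space_indexes = [i for i in space_index if i < index]
--
--         # if right spaces exist then find the nearest right space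
--         if right_space_indexes:
--             right_space = min(right_space_indexes)
--         # if left spaces exist then find the nearest left space
--         if left_space_indexes:
--             left_space = max(left_space_indexes)
--
--         # right and left spaces exist so the word in between them
--         if right_space_indexes and left_space_indexes:
--             return string[left_space + 1:right_space]
--         # left space doesn't exist so the word is in the beginning of the string
--         elif right_space_indexes:
--             return string[0:right_space]
--         # right space doesn't exist so the word is at the end of string
--         elif left_space_indexes:
--             return string[left_space + 1:-1]
--     # index is on the space_index so the required word is a space
--     return string[index]
-- ===== SOURCE B (Python) =====
-- def get_word_from_index(string: str, index: int) -> str: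
--     """Return the word of `string` containing position `index`.
--
--     Instead of listing every space position and filtering it with min/max,
--     locate the two bounding spaces directly with rfind/find.
--     Unlike the original, the last word is returned whole (the original
--     drops its final character via string[left+1:-1]).
--     """
--     # check inputs
--     if not (type(string) == str and type(index) == int):
--         raise TypeError("Arguments of this function have wrong type.\n")
--     # the index itself points at a space: that space is the answer
--     if 0 <= index < len(string) and string[index] == ' ':
--         return ' '
--     # nearest space strictly left of index / strictly right of index (-1 = none)
--     left = string.rfind(' ', 0, max(index, 0))
--     right = string.find(' ', max(index + 1, 0))
--     if right != -1 and left != -1: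
--         return string[left + 1:right]
--     if right != -1:
--         return string[:right]
--     if left != -1:
--         return string[left + 1:]
--     return string[index]
-- ===== Notes on version B (the rewrite author's own statement) =====
-- stated objective: simpler
-- what changed: Instead of enumerating every space position into a Python list and filtering it with min/max, B locates the two bounding spaces directly with str.rfind/str.find (C-level scans, no intermediate lists) and slices between them, returning the last word whole where A truncates it.
-- intended difference: When the index falls in the last word of a string whose last character is not a space (a left space exists, no space to the right), A returns string[left+1:-1], silently dropping the word's final character; B returns string[left+1:], the whole word, which is what the docstring promises. — e.g. on get_word_from_index("a b", 2): A returns "", B returns "b"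
import Mathlib
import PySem

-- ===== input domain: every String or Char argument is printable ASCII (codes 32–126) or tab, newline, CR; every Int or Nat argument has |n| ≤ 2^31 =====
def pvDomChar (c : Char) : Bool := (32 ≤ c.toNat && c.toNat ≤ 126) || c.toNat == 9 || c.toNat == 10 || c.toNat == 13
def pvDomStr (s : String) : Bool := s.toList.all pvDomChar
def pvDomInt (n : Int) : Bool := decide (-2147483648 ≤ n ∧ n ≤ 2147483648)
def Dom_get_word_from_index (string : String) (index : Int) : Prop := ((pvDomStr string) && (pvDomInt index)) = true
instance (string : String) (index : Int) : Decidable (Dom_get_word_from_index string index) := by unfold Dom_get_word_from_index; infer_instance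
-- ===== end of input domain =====

-- B replaces A's list of all space positions (filtered with min/max) by two direct rfind/find
-- scans for the bounding spaces, and returns the last word whole where A drops its final character.
-- Equivalence is about the return value; neither program mutates its arguments.

-- shared primitive: Python's string[index] (1-char string; none = IndexError, excluded by Pre_)
def pyStrAt (string : String) (index : Int) : String :=
  match PySem.List.pyGet? string.toList index with
  | some c => String.ofList [c]
  | none => ""

-- ===== PORT A =====
def letter_index_finder (string : String) (character : String) : List Int :=
  ((PySem.List.enumerate string.toList 0).filter
      (fun p => ([p.2] : List Char) == character.toList)).map (·.1)

def get_word_from_index (string : String) (index : Int) : String :=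
  let space_index := letter_index_finder string " "
  if index ∈ space_index then
    pyStrAt string index
  else
    let right_space_indexes := space_index.filter (fun i => index < i)
    let left_space_indexes := space_index.filter (fun i => i < index)
    if right_space_indexes.isEmpty = false ∧ left_space_indexes.isEmpty = false then
      let right_space := (PySem.List.min? right_space_indexes (fun x => x)).getD 0
      let left_space := (PySem.List.max? left_space_indexes (fun x => x)).getD 0
      String.ofList (PySem.List.slice string.toList (some (left_space + 1)) (some right_space))
    else if right_space_indexes.isEmpty = false then
      let right_space := (PySem.List.min? right_space_indexes (fun x => x)).getD 0
      String.ofList (PySem.List.slice string.toList (some 0) (some right_space))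
    else if left_space_indexes.isEmpty = false then
      let left_space := (PySem.List.max? left_space_indexes (fun x => x)).getD 0
      String.ofList (PySem.List.slice string.toList (some (left_space + 1)) (some (-1)))
    else
      pyStrAt string index

-- ===== PORT B =====
def get_word_from_index_alt (string : String) (index : Int) : String :=
  if 0 ≤ index ∧ index < (string.toList.length : Int) ∧
      PySem.List.pyGet? string.toList index = some ' ' then
    " "
  else
    let left := PySem.Str.rfindFrom string " " 0 (some (max index 0))
    let right := PySem.Str.findFrom string " " (max (index + 1) 0) none
    if right ≠ -1 ∧ left ≠ -1 then
      String.ofList (PySem.List.slice string.toList (some (left + 1)) (some right))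
    else if right ≠ -1 then
      String.ofList (PySem.List.slice string.toList none (some right))
    else if left ≠ -1 then
      String.ofList (PySem.List.slice string.toList (some (left + 1)) none)
    else
      pyStrAt string index

-- ===== PRECONDITION & SPEC =====
-- Pre_ excludes exactly the inputs where A raises IndexError at its final 'return string[index]':
-- a string with no space and an out-of-range index (B raises there too).
def Pre_get_word_from_index (string : String) (index : Int) : Prop :=
  (∃ j : Nat, j < string.toList.length ∧ string.toList[j]? = some ' ') ∨
    PySem.Raise.InRange string.toList.length index
instance (string : String) (index : Int) : Decidable (Pre_get_word_from_index string index) := by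
  unfold Pre_get_word_from_index; infer_instance

def pvWitness_get_word_from_index : String × Int := ("lulu is cute", 5)

-- When index falls in the last word of a string whose last character is not a space (a space
-- exists to the left, none to the right), A returns string[left+1:-1] — the last word with its
-- final character dropped — while B returns string[left+1:], the whole word, as intended.
def D_get_word_from_index (string : String) (index : Int) : Prop :=
  ¬ (0 ≤ index ∧ index < (string.toList.length : Int) ∧
      string.toList[index.toNat]? = some ' ') ∧
  ' ' ∈ string.toList.take index.toNat ∧
  ' ' ∉ string.toList.drop (index + 1).toNat ∧
  string.toList.getLast? ≠ some ' '
instance (string : String) (index : Int) : Decidable (D_get_word_from_index string index) := by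
  unfold D_get_word_from_index; infer_instance

def Spec_get_word_from_index (string : String) (index : Int) (out : String) : Prop :=
  ¬ D_get_word_from_index string index → out = get_word_from_index_alt string index
instance (string : String) (index : Int) (out : String) :
    Decidable (Spec_get_word_from_index string index out) := by
  unfold Spec_get_word_from_index; infer_instance

def pvDiffWitness_get_word_from_index : String × Int := ("a b", 2)
def pvDiffWitnessOut_get_word_from_index : String × String := ("", "b")

-- ===== CLAIM (what is proved, stated in full; the proofs are below) =====
def Claim_unchanged_get_word_from_index : Prop := ∀ (string : String) (index : Int), Dom_get_word_from_index string index → Pre_get_word_from_index string index → Spec_get_word_from_index string index (get_word_from_index string index)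
def Claim_changed_get_word_from_index : Prop := Dom_get_word_from_index (pvDiffWitness_get_word_from_index.1) (pvDiffWitness_get_word_from_index.2) ∧ Pre_get_word_from_index (pvDiffWitness_get_word_from_index.1) (pvDiffWitness_get_word_from_index.2) ∧ D_get_word_from_index (pvDiffWitness_get_word_from_index.1) (pvDiffWitness_get_word_from_index.2) ∧ get_word_from_index (pvDiffWitness_get_word_from_index.1) (pvDiffWitness_get_word_from_index.2) = pvDiffWitnessOut_get_word_from_index.1 ∧ get_word_from_index_alt (pvDiffWitness_get_word_from_index.1) (pvDiffWitness_get_word_from_index.2) = pvDiffWitnessOut_get_word_from_index.2 ∧ pvDiffWitnessOut_get_word_from_index.1 ≠ pvDiffWitnessOut_get_word_from_index.2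
def Claim_exact_get_word_from_index : Prop := ∀ (string : String) (index : Int), Dom_get_word_from_index string index → Pre_get_word_from_index string index → D_get_word_from_index string index → get_word_from_index string index ≠ get_word_from_index_alt string index

-- ===== LEMMAS AND PROOFS =====

lemma mem_take_iff (c : Char) (l : List Char) (k : Nat) :
    c ∈ l.take k ↔ ∃ j : Nat, j < l.length ∧ j < k ∧ l[j]? = some c := by
  rw [List.mem_iff_getElem?]
  constructor
  · rintro ⟨i, hi⟩
    rw [List.getElem?_take] at hi
    by_cases hik : i < k
    · rw [if_pos hik] at hi
      have hlt : i < l.length := by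
        by_contra hge
        rw [List.getElem?_eq_none (by omega)] at hi
        simp at hi
      exact ⟨i, hlt, hik, hi⟩
    · rw [if_neg hik] at hi; simp at hi
  · rintro ⟨j, hj1, hj2, hj3⟩
    exact ⟨j, by rw [List.getElem?_take, if_pos hj2]; exact hj3⟩

lemma mem_drop_iff (c : Char) (l : List Char) (k : Nat) :
    c ∈ l.drop k ↔ ∃ j : Nat, j < l.length ∧ k ≤ j ∧ l[j]? = some c := by
  rw [List.mem_iff_getElem?]
  constructor
  · rintro ⟨i, hi⟩
    rw [List.getElem?_drop] at hi
    have hlt : k + i < l.length := by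
      by_contra hge
      rw [List.getElem?_eq_none (by omega)] at hi
      simp at hi
    exact ⟨k + i, hlt, by omega, hi⟩
  · rintro ⟨j, hj1, hj2, hj3⟩
    refine ⟨j - k, ?_⟩
    rw [List.getElem?_drop, show k + (j - k) = j from by omega]
    exact hj3

lemma D_char (string : String) (index : Int) :
    D_get_word_from_index string index ↔
      (¬ (0 ≤ index ∧ index < (string.toList.length : Int) ∧
          string.toList[index.toNat]? = some ' ') ∧
      (∃ j : Nat, j < string.toList.length ∧ (j : Int) < index ∧ string.toList[j]? = some ' ') ∧
      (∀ j : Nat, j < string.toList.length → index < (j : Int) → string.toList[j]? ≠ some ' ') ∧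
      string.toList.getLast? ≠ some ' ') := by
  unfold D_get_word_from_index
  rw [mem_take_iff, mem_drop_iff]
  constructor
  · rintro ⟨h1, ⟨j, hj1, hj2, hj3⟩, h3, h4⟩
    refine ⟨h1, ⟨j, hj1, by omega, hj3⟩, fun j hj hij hsp => h3 ⟨j, hj, by omega, hsp⟩, h4⟩
  · rintro ⟨h1, ⟨j, hj1, hj2, hj3⟩, h3, h4⟩
    exact ⟨h1, ⟨j, hj1, by omega, hj3⟩,
      fun ⟨j, hj, hkj, hsp⟩ => h3 j hj (by omega) hsp, h4⟩

lemma prefix_single (c : Char) (l : List Char) : [c] <+: l ↔ l[0]? = some c := by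
  cases l with
  | nil => simp
  | cons a t => simp [List.cons_prefix_cons, eq_comm]

lemma prefix_single_drop (c : Char) (cs : List Char) (j : Nat) :
    [c] <+: cs.drop j ↔ cs[j]? = some c := by
  rw [prefix_single, List.getElem?_drop]; simp

-- find cs [' '] characterization
lemma find_space_eq_neg_one (cs : List Char) :
    PySem.Chars.find cs [' '] = -1 ↔ ∀ j : Nat, cs[j]? ≠ some ' ' := by
  rw [PySem.Chars.find_eq_neg_one_iff]
  constructor
  · intro h j hj
    exact h (by rw [← PySem.Chars.isIn_iff_infix, ← PySem.Chars.exists_prefix_drop_iff_isIn]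
                exact ⟨j, (prefix_single_drop _ _ _).2 hj⟩)
  · intro h hin
    rw [← PySem.Chars.isIn_iff_infix, ← PySem.Chars.exists_prefix_drop_iff_isIn] at hin
    obtain ⟨j, hj⟩ := hin
    exact h j ((prefix_single_drop _ _ _).1 hj)

lemma find_space_spec (cs : List Char) (h : PySem.Chars.find cs [' '] ≠ -1) :
    0 ≤ PySem.Chars.find cs [' '] ∧
    cs[(PySem.Chars.find cs [' ']).toNat]? = some ' ' ∧
    ∀ i : Nat, i < (PySem.Chars.find cs [' ']).toNat → cs[i]? ≠ some ' ' := by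
  have h0 : 0 ≤ PySem.Chars.find cs [' '] := by
    rcases (PySem.Chars.neg_one_le_find cs [' ']).lt_or_eq with h1 | h1
    · omega
    · exact absurd h1.symm h
  obtain ⟨h1, h2⟩ := PySem.Chars.find_spec (s := cs) (sub := [' ']) h0
  refine ⟨h0, (prefix_single_drop _ _ _).1 h1, fun i hi hsp => h2 i hi ((prefix_single_drop _ _ _).2 hsp)⟩

lemma rfind_go_spec (cs : List Char) : ∀ k : Nat,
    (PySem.Chars.rfind.go cs [' '] k = -1 ∧ ∀ j : Nat, j ≤ k → cs[j]? ≠ some ' ') ∨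
    (∃ j : Nat, j ≤ k ∧ cs[j]? = some ' ' ∧ PySem.Chars.rfind.go cs [' '] k = j ∧
      ∀ j' : Nat, j < j' → j' ≤ k → cs[j']? ≠ some ' ') := by
  intro k
  induction k with
  | zero =>
    by_cases h : cs[0]? = some ' '
    · right
      refine ⟨0, le_refl 0, h, ?_, fun j' h1 h2 => by omega⟩
      simp [PySem.Chars.rfind.go, List.isPrefixOf_iff_prefix, prefix_single, h]
    · left
      refine ⟨?_, fun j hj => by interval_cases j; exact h⟩
      simp [PySem.Chars.rfind.go, List.isPrefixOf_iff_prefix, prefix_single, h]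
  | succ n ih =>
    by_cases h : cs[n+1]? = some ' '
    · right
      refine ⟨n+1, le_refl _, h, ?_, by omega⟩
      simp [PySem.Chars.rfind.go, List.isPrefixOf_iff_prefix, prefix_single_drop, h]
    · have hgo : PySem.Chars.rfind.go cs [' '] (n+1) = PySem.Chars.rfind.go cs [' '] n := by
        simp [PySem.Chars.rfind.go, List.isPrefixOf_iff_prefix, prefix_single_drop, h]
      rcases ih with ⟨h1, h2⟩ | ⟨j, hj1, hj2, hj3, hj4⟩
      · left
        refine ⟨hgo.trans h1, fun j hj => ?_⟩
        rcases Nat.lt_or_ge j (n+1) with hlt | hge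
        · exact h2 j (by omega)
        · have : j = n+1 := by omega
          subst this; exact h
      · right
        refine ⟨j, by omega, hj2, hgo.trans hj3, fun j' hj' hj'' => ?_⟩
        rcases Nat.lt_or_ge j' (n+1) with hlt | hge
        · exact hj4 j' hj' (by omega)
        · have : j' = n+1 := by omega
          subst this; exact h

lemma right_spec (cs : List Char) (index : Int) :
    (PySem.Chars.findFrom cs [' '] (max (index+1) 0) none = -1 ↔
      ∀ j : Nat, j < cs.length → index < (j:Int) → cs[j]? ≠ some ' ') ∧
    (PySem.Chars.findFrom cs [' '] (max (index+1) 0) none ≠ -1 →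
      ∃ m : Nat, m < cs.length ∧ index < (m:Int) ∧ cs[m]? = some ' ' ∧
        PySem.Chars.findFrom cs [' '] (max (index+1) 0) none = (m:Int) ∧
        ∀ j : Nat, j < cs.length → index < (j:Int) → cs[j]? = some ' ' → m ≤ j) := by
  set n := cs.length with hn
  by_cases hst : max (index+1) 0 ≤ (n:Int)
  · have hcast : max (index+1) 0 = ((max (index+1) 0).toNat : Int) := by omega
    rw [hcast, PySem.Chars.findFrom_natCast cs [' '] _ (by omega)]
    set k := (max (index+1) 0).toNat with hk
    have hjk : ∀ j : Nat, (k ≤ j) ↔ (index < (j:Int)) := by intro j; omega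
    by_cases hf : PySem.Chars.find (cs.drop k) [' '] = -1
    · have hf' := (find_space_eq_neg_one _).1 hf
      rw [if_pos hf]
      refine ⟨⟨fun _ j hj hij => ?_, fun _ => rfl⟩, fun hne => absurd rfl hne⟩
      have := hf' (j - k)
      rwa [List.getElem?_drop, Nat.add_sub_cancel' ((hjk j).2 hij)] at this
    · obtain ⟨hpos, hsp, hmin⟩ := find_space_spec (cs.drop k) hf
      rw [if_neg hf]
      set f := PySem.Chars.find (cs.drop k) [' '] with hfdef
      rw [List.getElem?_drop] at hsp
      have hflen : k + f.toNat < n := by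
        by_contra hge
        rw [List.getElem?_eq_none_iff.2 (by omega)] at hsp
        simp at hsp
      constructor
      · constructor
        · intro habs; omega
        · intro hall
          exact absurd (hsp) (hall (k + f.toNat) hflen (by omega))
      · intro _
        refine ⟨k + f.toNat, hflen, by omega, hsp, by omega, fun j hj hij hspj => ?_⟩
        by_contra hlt
        have := hmin (j - k) (by omega)
        rw [List.getElem?_drop, Nat.add_sub_cancel' ((hjk j).2 hij)] at this
        exact this hspj
  · -- start past the end: no space strictly right of index
    have hres : PySem.Chars.findFrom cs [' '] (max (index+1) 0) none = -1 := by
      simp only [PySem.Chars.findFrom]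
      rw [if_neg (by omega : ¬ max (index+1) 0 < 0)]
      rw [if_pos (by omega : ((cs.length:Int)) < max (index+1) 0)]
    rw [hres]
    refine ⟨⟨fun _ j hj hij => ?_, fun _ => rfl⟩, fun hne => absurd rfl hne⟩
    omega

lemma left_spec (cs : List Char) (index : Int) :
    (PySem.Chars.rfindFrom cs [' '] 0 (some (max index 0)) = -1 ↔
      ∀ j : Nat, j < cs.length → (j:Int) < index → cs[j]? ≠ some ' ') ∧
    (PySem.Chars.rfindFrom cs [' '] 0 (some (max index 0)) ≠ -1 →
      ∃ m : Nat, m < cs.length ∧ (m:Int) < index ∧ cs[m]? = some ' ' ∧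
        PySem.Chars.rfindFrom cs [' '] 0 (some (max index 0)) = (m:Int) ∧
        ∀ j : Nat, j < cs.length → (j:Int) < index → cs[j]? = some ' ' → j ≤ m) := by
  set n := cs.length with hn
  set E := min ((max index 0).toNat) n with hE
  have hres : PySem.Chars.rfindFrom cs [' '] 0 (some (max index 0)) =
      (if PySem.Chars.rfind (cs.take E) [' '] = -1 then -1
       else PySem.Chars.rfind (cs.take E) [' ']) := by
    simp only [PySem.Chars.rfindFrom]
    have he : (if (n:Int) < max index 0 then (n:Int)
        else if max index 0 < 0 then (if max index 0 + n < 0 then 0 else max index 0 + n)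
        else max index 0) = ((E : Nat) : Int) := by
      rw [hE]; split
      · omega
      · rw [if_neg (by omega)]; omega
    rw [he]
    rw [if_neg (by omega : ¬ ((0:Int) < 0))]
    rw [if_neg (by omega : ¬ ((E : Nat) : Int) < 0)]
    rw [show ((E : Nat) : Int).toNat = E from by omega]
    simp
  have hlen : (cs.take E).length = E := by
    rw [List.length_take]; omega
  have hget : ∀ j : Nat, (cs.take E)[j]? = some ' ' ↔ (j < n ∧ (j:Int) < index ∧ cs[j]? = some ' ') := by
    intro j
    rw [List.getElem?_take]
    split
    · have hj : j < n ∧ (j:Int) < index := by omega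
      simp [hj.1, hj.2]
    · have hj : ¬ (j < n ∧ (j:Int) < index) := by omega
      simp; omega
  have hgo : PySem.Chars.rfind (cs.take E) [' '] = PySem.Chars.rfind.go (cs.take E) [' '] (cs.take E).length := rfl
  rcases rfind_go_spec (cs.take E) (cs.take E).length with ⟨h1, h2⟩ | ⟨m, hm1, hm2, hm3, hm4⟩
  · rw [hres, hgo, h1]
    refine ⟨⟨fun _ j hj hij hsp => ?_, fun _ => rfl⟩, fun hne => absurd rfl hne⟩
    exact h2 j (by omega) ((hget j).2 ⟨hj, hij, hsp⟩)
  · obtain ⟨hmn, hmi, hms⟩ := (hget m).1 hm2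
    rw [hres, hgo, hm3]
    rw [if_neg (by omega : ¬ ((m:Nat):Int) = -1)]
    constructor
    · constructor
      · intro habs; omega
      · intro hall; exact absurd hms (hall m hmn hmi)
    · intro _
      refine ⟨m, hmn, hmi, hms, rfl, fun j hj hij hsp => ?_⟩
      by_contra hlt
      exact hm4 j (by omega) (by have := hlen; omega) ((hget j).2 ⟨hj, hij, hsp⟩)

lemma mem_spaces (string : String) (i : Int) :
    i ∈ letter_index_finder string " " ↔
      ∃ k : Nat, k < string.toList.length ∧ i = (k:Int) ∧ string.toList[k]? = some ' ' := by
  unfold letter_index_finder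
  simp only [List.mem_map, List.mem_filter, PySem.List.mem_enumerate_iff]
  constructor
  · rintro ⟨⟨j, c⟩, ⟨⟨k, hk, hp⟩, hc⟩, rfl⟩
    cases hp
    refine ⟨k, hk, by simp, ?_⟩
    simp at hc
    simp [List.getElem?_eq_getElem hk, hc]
  · rintro ⟨k, hk, rfl, hsp⟩
    refine ⟨((k:Int), ' '), ⟨⟨k, hk, ?_⟩, by simp⟩, rfl⟩
    rw [List.getElem?_eq_getElem hk] at hsp
    simp at hsp
    simp [hsp]

lemma rightR (string : String) (index : Int) :
    ((letter_index_finder string " ").filter (fun i => index < i) = [] ↔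
      PySem.Chars.findFrom string.toList [' '] (max (index+1) 0) none = -1) ∧
    ((letter_index_finder string " ").filter (fun i => index < i) ≠ [] →
      (PySem.List.min? ((letter_index_finder string " ").filter (fun i => index < i))
          (fun x => x)).getD 0 =
        PySem.Chars.findFrom string.toList [' '] (max (index+1) 0) none) := by
  set cs := string.toList with hcs
  set R := (letter_index_finder string " ").filter (fun i => index < i) with hR
  set r := PySem.Chars.findFrom cs [' '] (max (index+1) 0) none with hr
  have hmemR : ∀ i : Int, i ∈ R ↔ ∃ k : Nat, k < cs.length ∧ i = (k:Int) ∧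
      cs[k]? = some ' ' ∧ index < (k:Int) := by
    intro i
    rw [hR, List.mem_filter]
    rw [mem_spaces]
    constructor
    · rintro ⟨⟨k, hk, rfl, hsp⟩, hlt⟩; exact ⟨k, hk, rfl, hsp, by simpa using hlt⟩
    · rintro ⟨k, hk, rfl, hsp, hlt⟩; exact ⟨⟨k, hk, rfl, hsp⟩, by simpa⟩
  obtain ⟨hneg, hpos⟩ := right_spec cs index
  have hempty : R = [] ↔ r = -1 := by
    constructor
    · intro he
      rw [hr, hneg]
      intro j hj hij hsp
      have : (j:Int) ∈ R := (hmemR _).2 ⟨j, hj, rfl, hsp, hij⟩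
      rw [he] at this; simp at this
    · intro he
      rcases List.eq_nil_or_concat R with h | _
      · exact h
      · by_contra hne
        obtain ⟨i, hi⟩ := List.exists_mem_of_ne_nil R hne
        obtain ⟨k, hk, rfl, hsp, hik⟩ := (hmemR i).1 hi
        exact (hneg.1 he) k hk hik hsp
  refine ⟨hempty, fun hne => ?_⟩
  have hrne : r ≠ -1 := fun h => hne (hempty.2 h)
  obtain ⟨m, hm1, hm2, hm3, hm4, hm5⟩ := hpos hrne
  obtain ⟨v, hv⟩ : ∃ v, PySem.List.min? R (fun x => x) = some v := by
    cases hmin : PySem.List.min? R (fun x => x) with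
    | none => exact absurd ((PySem.List.min?_eq_none_iff _ _).1 hmin) hne
    | some v => exact ⟨v, rfl⟩
  have hvR : v ∈ R := PySem.List.min?_mem hv
  have hvmin : ∀ y ∈ R, v ≤ y := PySem.List.min?_isMin hv
  obtain ⟨k, hk, rfl, hsp, hik⟩ := (hmemR v).1 hvR
  have hmR : ((m:Int)) ∈ R := (hmemR _).2 ⟨m, hm1, rfl, hm3, hm2⟩
  have h1 : (k:Int) ≤ (m:Int) := hvmin _ hmR
  have h2 : m ≤ k := hm5 k hk hik hsp
  rw [hv]
  have : (k:Int) = r := by rw [hr, hm4]; omega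
  simpa using this

lemma leftL (string : String) (index : Int) :
    ((letter_index_finder string " ").filter (fun i => i < index) = [] ↔
      PySem.Chars.rfindFrom string.toList [' '] 0 (some (max index 0)) = -1) ∧
    ((letter_index_finder string " ").filter (fun i => i < index) ≠ [] →
      (PySem.List.max? ((letter_index_finder string " ").filter (fun i => i < index))
          (fun x => x)).getD 0 =
        PySem.Chars.rfindFrom string.toList [' '] 0 (some (max index 0))) := by
  set cs := string.toList with hcs
  set L := (letter_index_finder string " ").filter (fun i => i < index) with hL
  set l := PySem.Chars.rfindFrom cs [' '] 0 (some (max index 0)) with hl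
  have hmemL : ∀ i : Int, i ∈ L ↔ ∃ k : Nat, k < cs.length ∧ i = (k:Int) ∧
      cs[k]? = some ' ' ∧ (k:Int) < index := by
    intro i
    rw [hL, List.mem_filter, mem_spaces]
    constructor
    · rintro ⟨⟨k, hk, rfl, hsp⟩, hlt⟩; exact ⟨k, hk, rfl, hsp, by simpa using hlt⟩
    · rintro ⟨k, hk, rfl, hsp, hlt⟩; exact ⟨⟨k, hk, rfl, hsp⟩, by simpa⟩
  obtain ⟨hneg, hpos⟩ := left_spec cs index
  have hempty : L = [] ↔ l = -1 := by
    constructor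
    · intro he
      rw [hl, hneg]
      intro j hj hij hsp
      have : (j:Int) ∈ L := (hmemL _).2 ⟨j, hj, rfl, hsp, hij⟩
      rw [he] at this; simp at this
    · intro he
      by_contra hne
      obtain ⟨i, hi⟩ := List.exists_mem_of_ne_nil L hne
      obtain ⟨k, hk, rfl, hsp, hik⟩ := (hmemL i).1 hi
      exact (hneg.1 he) k hk hik hsp
  refine ⟨hempty, fun hne => ?_⟩
  have hlne : l ≠ -1 := fun h => hne (hempty.2 h)
  obtain ⟨m, hm1, hm2, hm3, hm4, hm5⟩ := hpos hlne
  obtain ⟨v, hv⟩ : ∃ v, PySem.List.max? L (fun x => x) = some v := by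
    cases hmax : PySem.List.max? L (fun x => x) with
    | none => exact absurd ((PySem.List.max?_eq_none_iff _ _).1 hmax) hne
    | some v => exact ⟨v, rfl⟩
  have hvL : v ∈ L := PySem.List.max?_mem hv
  have hvmax : ∀ y ∈ L, y ≤ v := PySem.List.max?_isMax hv
  obtain ⟨k, hk, rfl, hsp, hik⟩ := (hmemL v).1 hvL
  have hmL : ((m:Int)) ∈ L := (hmemL _).2 ⟨m, hm1, rfl, hm3, hm2⟩
  have h1 : (m:Int) ≤ (k:Int) := hvmax _ hmL
  have h2 : k ≤ m := hm5 k hk hik hsp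
  rw [hv]
  have : (k:Int) = l := by rw [hl, hm4]; omega
  simpa using this

lemma AB_eq (string : String) (index : Int)
    (hnD : ¬ D_get_word_from_index string index) :
    get_word_from_index string index = get_word_from_index_alt string index := by
  have hsL : (" ":String).toList = [' '] := by decide
  by_cases hmem : index ∈ letter_index_finder string " "
  · obtain ⟨k, hk, hik, hspc⟩ := (mem_spaces string index).1 hmem
    subst hik
    rw [get_word_from_index, get_word_from_index_alt]
    simp only [if_pos hmem]
    rw [if_pos ⟨by omega, by omega, by simpa using hspc⟩]
    simp [pyStrAt, hspc]
  · have hBcond : ¬ (0 ≤ index ∧ index < (string.toList.length:Int) ∧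
        PySem.List.pyGet? string.toList index = some ' ') := by
      rintro ⟨h0, hlt, hg⟩
      exact hmem ((mem_spaces string index).2 ⟨index.toNat, by omega, by omega,
        by rw [PySem.List.pyGet?_of_nonneg _ h0] at hg; exact hg⟩)
    rw [get_word_from_index, get_word_from_index_alt]
    simp only [if_neg hmem, if_neg hBcond]
    simp only [PySem.Str.findFrom, PySem.Str.rfindFrom, hsL]
    obtain ⟨hRe, hRv⟩ := rightR string index
    obtain ⟨hLe, hLv⟩ := leftL string index
    by_cases hR : (letter_index_finder string " ").filter (fun i => index < i) = []
    · by_cases hL : (letter_index_finder string " ").filter (fun i => i < index) = []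
      · -- no spaces on either side: both fall through to string[index]
        have hr : PySem.Chars.findFrom string.toList [' '] (max (index+1) 0) none = -1 := hRe.1 hR
        have hl : PySem.Chars.rfindFrom string.toList [' '] 0 (some (max index 0)) = -1 := hLe.1 hL
        rw [hR, hL]
        simp [hr, hl]
      · -- the D_ region minus D_: the string must end in a space, both slices are empty
        have hrneg : PySem.Chars.findFrom string.toList [' '] (max (index+1) 0) none = -1 := hRe.1 hR
        have hlne : PySem.Chars.rfindFrom string.toList [' '] 0 (some (max index 0)) ≠ -1 :=
          fun h => hL (hLe.2 h)
        obtain ⟨m, hm1, hm2, hm3, hm4, hm5⟩ := (left_spec string.toList index).2 hlne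
        have hD3 : ∀ j : Nat, j < string.toList.length → index < (j:Int) →
            string.toList[j]? ≠ some ' ' := (right_spec string.toList index).1.1 hrneg
        have hD1 : ¬ (0 ≤ index ∧ index < (string.toList.length:Int) ∧
            string.toList[index.toNat]? = some ' ') := by
          rintro ⟨a, b, c⟩
          exact hBcond ⟨a, b, by rw [PySem.List.pyGet?_of_nonneg _ a]; exact c⟩
        have hlast : string.toList.getLast? = some ' ' := by
          by_contra h'
          exact hnD ((D_char string index).2 ⟨hD1, ⟨m, hm1, hm2, hm3⟩, hD3, h'⟩)
        have hn0 : 0 < string.toList.length := by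
          cases hcs : string.toList with
          | nil => rw [hcs] at hlast; simp at hlast
          | cons a t => simp
        have hn1 : string.toList[string.toList.length - 1]? = some ' ' := by
          rw [← List.getLast?_eq_getElem?]; exact hlast
        have hidx : (string.toList.length : Int) ≤ index := by
          by_contra hlt
          rcases lt_or_ge index ((string.toList.length:Int) - 1) with hc | hc
          · exact hD3 (string.toList.length - 1) (by omega) (by omega) hn1
          · refine hD1 ⟨by omega, by omega, ?_⟩
            have ht : index.toNat = string.toList.length - 1 := by omega
            rw [ht]; exact hn1
        have hm : m = string.toList.length - 1 := by
          have := hm5 (string.toList.length - 1) (by omega) (by omega) hn1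
          omega
        rw [hR]
        rw [if_neg (by simp : ¬ ((([]:List Int)).isEmpty = false ∧
          ((letter_index_finder string " ").filter (fun i => i < index)).isEmpty = false))]
        rw [if_neg (by simp : ¬ (([]:List Int)).isEmpty = false)]
        rw [if_pos (by simp [List.isEmpty_eq_false_iff, hL] :
          ((letter_index_finder string " ").filter (fun i => i < index)).isEmpty = false)]
        rw [if_neg (fun h => h.1 hrneg), if_neg (fun h => h hrneg), if_pos hlne]
        rw [hLv hL, hm4]
        have hplus : ((m:Int)) + 1 = ((string.toList.length : Nat) : Int) := by omega
        rw [hplus]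
        have e1 : PySem.List.slice string.toList (some ((string.toList.length:Nat):Int)) none
            = [] := by
          rw [PySem.List.slice_from_natCast]
          exact List.drop_length
        have e2 : PySem.List.slice string.toList (some ((string.toList.length:Nat):Int))
            (some (-1)) = [] := by
          apply List.eq_nil_of_length_eq_zero
          rw [PySem.List.length_slice]
          simp
        rw [e1, e2]
    · by_cases hL : (letter_index_finder string " ").filter (fun i => i < index) = []
      · -- word at the beginning: string[0:right] vs string[:right]
        have hl : PySem.Chars.rfindFrom string.toList [' '] 0 (some (max index 0)) = -1 := hLe.1 hL
        have hr : PySem.Chars.findFrom string.toList [' '] (max (index+1) 0) none ≠ -1 :=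
          fun h => hR (hRe.2 h)
        rw [hL]
        rw [if_neg (by simp [List.isEmpty_eq_false_iff, hR] : ¬ (((letter_index_finder string " ").filter (fun i => index < i)).isEmpty = false ∧ (([]:List Int)).isEmpty = false))]
        rw [if_pos (by simp [List.isEmpty_eq_false_iff, hR] : ((letter_index_finder string " ").filter (fun i => index < i)).isEmpty = false)]
        rw [if_neg (fun h => h.2 hl), if_pos hr]
        rw [hRv hR]
        rw [PySem.List.slice_zero_start]
      · -- spaces on both sides
        have hr : PySem.Chars.findFrom string.toList [' '] (max (index+1) 0) none ≠ -1 :=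
          fun h => hR (hRe.2 h)
        have hl : PySem.Chars.rfindFrom string.toList [' '] 0 (some (max index 0)) ≠ -1 :=
          fun h => hL (hLe.2 h)
        rw [if_pos ⟨by simp [List.isEmpty_eq_false_iff, hR], by simp [List.isEmpty_eq_false_iff, hL]⟩,
            if_pos ⟨hr, hl⟩]
        rw [hRv hR, hLv hL]


-- ===== VERDICT (by name: the statement is the Claim_ definition above) =====
theorem get_word_from_index_spec : Claim_unchanged_get_word_from_index := by
  intro string index _ _
  unfold Spec_get_word_from_index
  intro hnD
  exact AB_eq string index hnD
theorem get_word_from_index_changed : Claim_changed_get_word_from_index := by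
  unfold Claim_changed_get_word_from_index; decide
theorem get_word_from_index_tight : Claim_exact_get_word_from_index := by
  unfold Claim_exact_get_word_from_index
  intro string index _ _ hD
  obtain ⟨hD1, ⟨j, hj1, hj2, hj3⟩, hD3, hD4⟩ := (D_char string index).1 hD
  have hsL : (" ":String).toList = [' '] := by decide
  have hmem : index ∉ letter_index_finder string " " := by
    intro hmem
    obtain ⟨k, hk, hik, hspc⟩ := (mem_spaces string index).1 hmem
    refine hD1 ⟨by omega, by omega, ?_⟩
    have : index.toNat = k := by omega
    rw [this]; exact hspc
  have hBcond : ¬ (0 ≤ index ∧ index < (string.toList.length:Int) ∧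
      PySem.List.pyGet? string.toList index = some ' ') := by
    rintro ⟨a, b, c⟩
    exact hD1 ⟨a, b, by rw [PySem.List.pyGet?_of_nonneg _ a] at c; exact c⟩
  have hR : (letter_index_finder string " ").filter (fun i => index < i) = [] := by
    rw [List.eq_nil_iff_forall_not_mem]
    intro i hi
    rw [List.mem_filter, mem_spaces] at hi
    obtain ⟨⟨k, hk, rfl, hsp⟩, hlt⟩ := hi
    exact hD3 k hk (by simpa using hlt) hsp
  have hL : (letter_index_finder string " ").filter (fun i => i < index) ≠ [] := by
    refine List.ne_nil_of_mem (a := (j:Int)) ?_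
    exact List.mem_filter.2 ⟨(mem_spaces string _).2 ⟨j, hj1, rfl, hj3⟩, by simpa using hj2⟩
  obtain ⟨hRe, hRv⟩ := rightR string index
  obtain ⟨hLe, hLv⟩ := leftL string index
  have hrneg : PySem.Chars.findFrom string.toList [' '] (max (index+1) 0) none = -1 := hRe.1 hR
  have hlne : PySem.Chars.rfindFrom string.toList [' '] 0 (some (max index 0)) ≠ -1 :=
    fun h => hL (hLe.2 h)
  obtain ⟨m, hm1, hm2, hm3, hm4, hm5⟩ := (left_spec string.toList index).2 hlne
  have hmne : m ≠ string.toList.length - 1 := by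
    intro hmeq
    refine hD4 ?_
    rw [List.getLast?_eq_getElem?, ← hmeq]
    exact hm3
  rw [get_word_from_index, get_word_from_index_alt]
  simp only [if_neg hmem, if_neg hBcond]
  simp only [PySem.Str.findFrom, PySem.Str.rfindFrom, hsL]
  rw [hR]
  rw [if_neg (by simp : ¬ ((([]:List Int)).isEmpty = false ∧
    ((letter_index_finder string " ").filter (fun i => i < index)).isEmpty = false))]
  rw [if_neg (by simp : ¬ (([]:List Int)).isEmpty = false)]
  rw [if_pos (by simp [List.isEmpty_eq_false_iff, hL] :
    ((letter_index_finder string " ").filter (fun i => i < index)).isEmpty = false)]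
  rw [if_neg (fun h => h.1 hrneg), if_neg (fun h => h hrneg), if_pos hlne]
  rw [hLv hL, hm4]
  have hcast : ((m:Int)) + 1 = ((m+1 : Nat) : Int) := by push_cast; ring
  rw [hcast]
  intro heq
  have hlists := congrArg String.toList heq
  rw [String.toList_ofList, String.toList_ofList] at hlists
  have hlen := congrArg List.length hlists
  rw [PySem.List.length_slice, PySem.List.slice_from_natCast, List.length_drop] at hlen
  rw [PySem.List.clampIdx_neg_one, PySem.List.clampIdx_natCast] at hlen
  simp at hlen
  have hslen : string.toList.length = string.length := String.length_toList
  omega
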